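-- pv_equiv track=rewrite | github.com/glopez99/advent_of_code | 2020/Day11/Day11.py | findFirstUpSeat
-- ===== SOURCE A (Python) =====
-- def findFirstUpSeat(i, j, currentSeating):
--   if currentSeating[i][j] == ".":
--     i = i - 1
--     if i >= 0:
--       return findFirstUpSeat(i, j, currentSeating)
--     else:
--       return "L"
--   else:
--     return currentSeating[i][j]
-- ===== SOURCE B (Python) =====
-- def findFirstUpSeat(i, j, currentSeating):
--     cell = currentSeating[i][j]
--     if cell != ".":
--         return cell
--     for k in range(i - 1, -1, -1):
--         if currentSeating[k][j] != ".":
--             return currentSeating[k][j]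
--     return "L"
-- ===== Notes on version B (the rewrite author's own statement) =====
-- stated objective: idiomatic
-- what changed: Replaces A's tail recursion (decrement-and-recurse with a bound check after the decrement) by a direct iterative upward scan over range(i-1,-1,-1) after inspecting the starting cell once.
import Mathlib
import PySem

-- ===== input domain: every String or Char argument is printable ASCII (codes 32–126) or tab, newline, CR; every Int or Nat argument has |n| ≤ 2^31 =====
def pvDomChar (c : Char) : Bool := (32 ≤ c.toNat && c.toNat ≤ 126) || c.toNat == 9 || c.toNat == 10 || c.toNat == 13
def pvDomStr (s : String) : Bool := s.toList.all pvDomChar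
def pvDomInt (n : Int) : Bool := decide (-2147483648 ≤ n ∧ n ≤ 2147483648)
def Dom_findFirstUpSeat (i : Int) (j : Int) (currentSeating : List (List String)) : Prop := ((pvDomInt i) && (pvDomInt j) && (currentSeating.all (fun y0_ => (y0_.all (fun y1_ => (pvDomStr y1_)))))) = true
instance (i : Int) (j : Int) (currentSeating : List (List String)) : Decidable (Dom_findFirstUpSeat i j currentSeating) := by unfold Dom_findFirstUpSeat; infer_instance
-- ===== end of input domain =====

-- B replaces A's tail recursion by an iterative upward scan over range(i-1,-1,-1); same values, same cost.

-- ===== PORT A =====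
def findFirstUpSeat (i : Int) (j : Int) (currentSeating : List (List String)) : String :=
  if PySem.List.pyGetD (PySem.List.pyGetD currentSeating i []) j "" = "." then
    if i - 1 ≥ 0 then findFirstUpSeat (i - 1) j currentSeating
    else "L"
  else PySem.List.pyGetD (PySem.List.pyGetD currentSeating i []) j ""
termination_by i.toNat
decreasing_by omega

-- ===== PORT B =====
-- the for-loop over range(i-1, -1, -1) with early return
def scanUpB (j : Int) (currentSeating : List (List String)) : List Int → String
  | [] => "L"
  | k :: ks =>
    if PySem.List.pyGetD (PySem.List.pyGetD currentSeating k []) j "" ≠ "." then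
      PySem.List.pyGetD (PySem.List.pyGetD currentSeating k []) j ""
    else scanUpB j currentSeating ks

def findFirstUpSeat_alt (i : Int) (j : Int) (currentSeating : List (List String)) : String :=
  let cell := PySem.List.pyGetD (PySem.List.pyGetD currentSeating i []) j ""
  if cell ≠ "." then cell
  else scanUpB j currentSeating (PySem.List.pyRange (i - 1) (-1) (-1))

-- ===== PRECONDITION & SPEC =====
-- Pre_ excludes exactly the inputs on which Python A raises IndexError: the start index i must be
-- valid, column j must exist in the starting row, and in every row the scan visits before the first
-- non-'.' cell.
def Pre_findFirstUpSeat (i : Int) (j : Int) (currentSeating : List (List String)) : Prop :=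
  PySem.Raise.InRange currentSeating.length i ∧
  PySem.Raise.InRange (PySem.List.pyGetD currentSeating i []).length j ∧
  ∀ k : Nat, k < currentSeating.length → (k : Int) < i →
    (∀ m : Nat, m < currentSeating.length → k < m → (m : Int) ≤ i →
      PySem.List.pyGetD (PySem.List.pyGetD currentSeating (m : Int) []) j "" = ".") →
    PySem.Raise.InRange (PySem.List.pyGetD currentSeating (k : Int) []).length j

instance (i : Int) (j : Int) (currentSeating : List (List String)) : Decidable (Pre_findFirstUpSeat i j currentSeating) := by unfold Pre_findFirstUpSeat; infer_instance

def pvWitness_findFirstUpSeat : Int × Int × List (List String) := (1, 0, [["L"], ["."]])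

def Spec_findFirstUpSeat (i : Int) (j : Int) (currentSeating : List (List String)) (out : String) : Prop := out = findFirstUpSeat_alt i j currentSeating
instance (i : Int) (j : Int) (currentSeating : List (List String)) (out : String) : Decidable (Spec_findFirstUpSeat i j currentSeating out) := by unfold Spec_findFirstUpSeat; infer_instance

-- ===== CLAIM (what is proved, stated in full; the proofs are below) =====
def Claim_equal_findFirstUpSeat : Prop := ∀ (i : Int) (j : Int) (currentSeating : List (List String)), Dom_findFirstUpSeat i j currentSeating → Pre_findFirstUpSeat i j currentSeating → Spec_findFirstUpSeat i j currentSeating (findFirstUpSeat i j currentSeating)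

-- ===== LEMMAS AND PROOFS =====

-- A's recursion equals "inspect the starting cell, then scan range(i-1,-1,-1)"; this holds for
-- every input, so the claim follows without using Pre_ (Pre_ only delimits where Python A returns).
theorem findFirstUpSeat_eq_scan (i : Int) (j : Int) (cs : List (List String)) :
    findFirstUpSeat i j cs =
      (if PySem.List.pyGetD (PySem.List.pyGetD cs i []) j "" ≠ "." then
        PySem.List.pyGetD (PySem.List.pyGetD cs i []) j ""
      else scanUpB j cs (PySem.List.pyRange (i - 1) (-1) (-1))) := by
  induction i using findFirstUpSeat.induct (j := j) (currentSeating := cs) with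
  | case1 i hdot hge ih =>
    have hlt : (-1 : Int) < i - 1 := by omega
    rw [findFirstUpSeat, if_pos hdot, if_pos hge, ih, if_neg (not_not_intro hdot),
      PySem.List.pyRange_neg_one_cons hlt, scanUpB]
  | case2 i hdot hge =>
    rw [findFirstUpSeat, if_pos hdot, if_neg hge, if_neg (not_not_intro hdot),
      PySem.List.pyRange_neg_one_eq_nil (by omega), scanUpB]
  | case3 i hdot =>
    rw [findFirstUpSeat, if_neg hdot, if_pos hdot]

-- ===== VERDICT (by name: the statement is the Claim_ definition above) =====
theorem findFirstUpSeat_spec : Claim_equal_findFirstUpSeat := by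
  intro i j cs _ _
  unfold Spec_findFirstUpSeat findFirstUpSeat_alt
  exact findFirstUpSeat_eq_scan i j cs
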